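-- pv_equiv track=rewrite | github.com/chw0912/CodingTest | 프로그래머스/3/258709. 주사위 고르기/주사위 고르기.py | win_game_fast
-- ===== SOURCE A (Python) =====
-- def get_sums(dice_group):
--     if not dice_group:
--         return {}
--
--     # 초기값: 주사위 0개를 굴렸을 때의 합계 0은 1가지 경우의 수
--     sums = {0: 1}
--
--     # A 또는 B가 선택한 각 주사위(current_dice)를 순회
--     for current_dice in dice_group:
--         new_sums = {}
--
--         # 이전까지의 합(prev_sum)과 그 횟수(count)
--         for prev_sum, count in sums.items():
--
--             # 현재 주사위의 각 면(face)을 더함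
--             for face in current_dice:
--                 new_sum = prev_sum + face
--
--                 # 새로운 합계의 횟수를 업데이트: 이전 합계의 횟수만큼 누적
--                 new_sums[new_sum] = new_sums.get(new_sum, 0) + count
--
--         sums = new_sums
--
--     return sums
--
-- def win_game_fast(A, B):
--     A_sums = get_sums(A)
--     B_sums = get_sums(B)
--
--     A_win = 0
--     B_win = 0
--
--     # A의 가능한 합계와 B의 가능한 합계를 비교
--     for a_sum, a_count in A_sums.items():
--         for b_sum, b_count in B_sums.items():
--
--             if a_sum > b_sum:
--                 # A의 승리 횟수 누적
--                 A_win += a_count * b_count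
--
--             elif a_sum < b_sum:
--                 # B의 승리 횟수 (A의 패배 횟수) 누적
--                 B_win += a_count * b_count
--
--     return A_win, B_win
-- ===== SOURCE B (Python) =====
-- def _sums(dice_group):
--     if not dice_group:
--         return {}
--     sums = {0: 1}
--     for dice in dice_group:
--         new = {}
--         for face in dice:
--             for s, c in sums.items():
--                 new[s + face] = new.get(s + face, 0) + c
--         sums = new
--     return sums
--
-- def win_game_fast(A, B):
--     a_items = sorted(_sums(A).items(), key=lambda kv: kv[0])
--     b_items = sorted(_sums(B).items(), key=lambda kv: kv[0])
--     total_b = sum(c for _, c in b_items)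
--     a_win = 0
--     b_win = 0
--     less = 0
--     j = 0
--     for a, ac in a_items:
--         while j < len(b_items) and b_items[j][0] < a:
--             less += b_items[j][1]
--             j += 1
--         tie = b_items[j][1] if j < len(b_items) and b_items[j][0] == a else 0
--         a_win += ac * less
--         b_win += ac * (total_b - less - tie)
--     return a_win, b_win
-- ===== Notes on version B (the rewrite author's own statement) =====
-- stated objective: faster
-- what changed: B replaces A's O(n*m) all-pairs comparison of the two sum distributions by sorting both distributions once and counting wins/losses in a single two-pointer merge pass with running cumulative counts (and builds the convolution with the face/previous-sum loops swapped).
import Mathlib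
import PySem

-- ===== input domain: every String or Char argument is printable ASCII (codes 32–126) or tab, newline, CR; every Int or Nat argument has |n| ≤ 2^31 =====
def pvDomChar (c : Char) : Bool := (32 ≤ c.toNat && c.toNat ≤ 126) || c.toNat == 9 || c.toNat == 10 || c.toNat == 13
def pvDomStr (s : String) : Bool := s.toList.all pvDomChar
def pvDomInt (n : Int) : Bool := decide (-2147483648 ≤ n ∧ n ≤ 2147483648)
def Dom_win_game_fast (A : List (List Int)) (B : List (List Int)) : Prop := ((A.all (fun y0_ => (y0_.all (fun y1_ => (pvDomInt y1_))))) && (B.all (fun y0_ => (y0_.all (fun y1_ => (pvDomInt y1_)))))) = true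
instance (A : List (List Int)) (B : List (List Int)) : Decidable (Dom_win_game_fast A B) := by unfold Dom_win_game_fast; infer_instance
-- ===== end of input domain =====

-- B replaces A's all-pairs win/lose count over the two sum distributions by sorting both
-- distributions and one two-pointer merge pass (the Python tuple result is rendered as the
-- two-element list [A_win, B_win] on both sides).

-- ===== PORT A =====
-- get_sums: dict convolution, previous sums outer / faces inner
def getSums (dice_group : List (List Int)) : PySem.Dict Int Int :=
  if dice_group = [] then PySem.Dict.empty
  else
    dice_group.foldl
      (fun sums current_dice =>
        sums.items.foldl
          (fun new_sums pc =>
            current_dice.foldl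
              (fun new_sums face =>
                new_sums.insert (pc.1 + face) (new_sums.getD (pc.1 + face) 0 + pc.2))
              new_sums)
          PySem.Dict.empty)
      (PySem.Dict.empty.insert 0 1)

def win_game_fast (A : List (List Int)) (B : List (List Int)) : List Int :=
  let A_sums := getSums A
  let B_sums := getSums B
  let r :=
    A_sums.items.foldl
      (fun acc p =>
        B_sums.items.foldl
          (fun acc q =>
            if p.1 > q.1 then (acc.1 + p.2 * q.2, acc.2)
            else if p.1 < q.1 then (acc.1, acc.2 + p.2 * q.2)
            else acc)
          acc)
      ((0 : Int), (0 : Int))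
  [r.1, r.2]

-- ===== PORT B =====
-- _sums: dict convolution, faces outer / previous sums inner
def altSums (dice_group : List (List Int)) : PySem.Dict Int Int :=
  if dice_group = [] then PySem.Dict.empty
  else
    dice_group.foldl
      (fun sums dice =>
        dice.foldl
          (fun new face =>
            sums.items.foldl
              (fun new pc =>
                new.insert (pc.1 + face) (new.getD (pc.1 + face) 0 + pc.2))
              new)
          PySem.Dict.empty)
      (PySem.Dict.empty.insert 0 1)

-- the for-loop over a_items with the inner while over b_items (pointer j, running `less`),
-- transcribed as a recursion consuming the two sorted lists
def mergeGo (LA : List (Int × Int)) (LB : List (Int × Int)) (totalB less aw bw : Int) :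
    Int × Int :=
  match LA with
  | [] => (aw, bw)
  | (a, ac) :: rest =>
    match LB with
    | (b, bc) :: LB' =>
      if b < a then mergeGo ((a, ac) :: rest) LB' totalB (less + bc) aw bw
      else
        mergeGo rest ((b, bc) :: LB') totalB less (aw + ac * less)
          (bw + ac * (totalB - less - (if b = a then bc else 0)))
    | [] => mergeGo rest [] totalB less (aw + ac * less) (bw + ac * (totalB - less - 0))
  termination_by LA.length + LB.length

def win_game_fast_alt (A : List (List Int)) (B : List (List Int)) : List Int :=
  let a_items := PySem.List.sorted (altSums A).items (fun kv => kv.1) false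
  let b_items := PySem.List.sorted (altSums B).items (fun kv => kv.1) false
  let total_b := (b_items.map (fun kv => kv.2)).sum
  let r := mergeGo a_items b_items total_b 0 0 0
  [r.1, r.2]

-- ===== PRECONDITION & SPEC =====
def Spec_win_game_fast (A : List (List Int)) (B : List (List Int)) (out : List Int) : Prop := out = win_game_fast_alt A B
instance (A : List (List Int)) (B : List (List Int)) (out : List Int) : Decidable (Spec_win_game_fast A B out) := by unfold Spec_win_game_fast; infer_instance

-- ===== CLAIM (what is proved, stated in full; the proofs are below) =====
def Claim_equal_win_game_fast : Prop := ∀ (A : List (List Int)) (B : List (List Int)), Dom_win_game_fast A B → Spec_win_game_fast A B (win_game_fast A B)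

-- ===== LEMMAS AND PROOFS =====

def sLess (L : List (Int × Int)) (a : Int) : Int :=
  (L.map (fun q => if q.1 < a then q.2 else 0)).sum
def sGt (L : List (Int × Int)) (a : Int) : Int :=
  (L.map (fun q => if a < q.1 then q.2 else 0)).sum
def wWin (LA LB : List (Int × Int)) : Int :=
  (LA.map (fun p => p.2 * sLess LB p.1)).sum
def wLose (LA LB : List (Int × Int)) : Int :=
  (LA.map (fun p => p.2 * sGt LB p.1)).sum

theorem innerA (LB : List (Int × Int)) (a ac : Int) :
    ∀ x y : Int,
      LB.foldl
        (fun acc q =>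
          if a > q.1 then (acc.1 + ac * q.2, acc.2)
          else if a < q.1 then (acc.1, acc.2 + ac * q.2)
          else acc) (x, y)
      = (x + ac * sLess LB a, y + ac * sGt LB a) := by
  induction LB with
  | nil => intro x y; simp [sLess, sGt]
  | cons q t ih =>
    intro x y
    simp only [List.foldl_cons, sLess, sGt, List.map_cons, List.sum_cons]
    rcases lt_trichotomy q.1 a with h | h | h
    · rw [if_pos (by exact h), if_pos h, if_neg (by omega), ih]
      simp [sLess, sGt]; all_goals ring
    · rw [if_neg (by omega), if_neg (by omega), if_neg (by omega), if_neg (by omega), ih]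
      simp [sLess, sGt]
    · rw [if_neg (by omega), if_pos h, if_neg (by omega), if_pos h, ih]
      simp [sLess, sGt]; all_goals ring

theorem outerA (LA LB : List (Int × Int)) :
    ∀ x y : Int,
      LA.foldl
        (fun acc p =>
          LB.foldl
            (fun acc q =>
              if p.1 > q.1 then (acc.1 + p.2 * q.2, acc.2)
              else if p.1 < q.1 then (acc.1, acc.2 + p.2 * q.2)
              else acc) acc) (x, y)
      = (x + wWin LA LB, y + wLose LA LB) := by
  induction LA with
  | nil => intro x y; simp [wWin, wLose]
  | cons p t ih =>
    intro x y
    simp only [List.foldl_cons]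
    rw [innerA LB p.1 p.2 x y, ih]
    simp only [wWin, wLose, List.map_cons, List.sum_cons, Prod.mk.injEq]
    constructor <;> ring

theorem merge_spec (T : Int) :
    ∀ (LA LB : List (Int × Int)) (less aw bw : Int),
    List.Pairwise (fun p q : Int × Int => p.1 ≤ q.1) LA →
    List.Pairwise (fun p q : Int × Int => p.1 < q.1) LB →
    T = less + (LB.map (fun kv => kv.2)).sum →
    mergeGo LA LB T less aw bw
      = (aw + (LA.map (fun p => p.2 * (less + sLess LB p.1))).sum,
         bw + (LA.map (fun p => p.2 * sGt LB p.1)).sum) := by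
  intro LA LB less aw bw
  induction LA, LB, less, aw, bw using mergeGo.induct (totalB := T) with
  | case1 LB less aw bw => intro _ _ _; simp [mergeGo]
  | case2 less aw bw a ac rest b bc LB' hlt ih =>
    intro hA hB hT
    rw [mergeGo]
    simp only [if_pos hlt]
    have hb : ∀ p ∈ (a, ac) :: rest, b < p.1 := by
      intro p hp
      rcases List.mem_cons.mp hp with rfl | hp
      · exact hlt
      · exact lt_of_lt_of_le hlt ((List.pairwise_cons.mp hA).1 p hp)
    rw [ih hA (List.pairwise_cons.mp hB).2 (by simp at hT ⊢; omega)]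
    have h1 : ∀ p ∈ (a, ac) :: rest,
        p.2 * (less + bc + sLess LB' p.1) = p.2 * (less + sLess ((b, bc) :: LB') p.1) := by
      intro p hp
      have : sLess ((b, bc) :: LB') p.1 = bc + sLess LB' p.1 := by
        simp [sLess, if_pos (hb p hp)]
      rw [this]; ring
    have h2 : ∀ p ∈ (a, ac) :: rest,
        p.2 * sGt LB' p.1 = p.2 * sGt ((b, bc) :: LB') p.1 := by
      intro p hp
      have : sGt ((b, bc) :: LB') p.1 = sGt LB' p.1 := by
        simp [sGt, if_neg (by have := hb p hp; omega : ¬ p.1 < b)]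
      rw [this]
    rw [List.map_congr_left h1, List.map_congr_left h2]
  | case3 less aw bw a ac rest b bc LB' hnlt ih =>
    intro hA hB hT
    rw [mergeGo]
    simp only [if_neg hnlt]
    simp only [dite_eq_ite] at ih
    rw [ih (List.pairwise_cons.mp hA).2 hB hT]
    have hge : ∀ q ∈ LB', b < q.1 := (List.pairwise_cons.mp hB).1
    have hsl : sLess ((b, bc) :: LB') a = 0 := by
      apply List.sum_eq_zero
      intro x hx
      simp only [List.map_cons, List.mem_cons] at hx
      rcases hx with rfl | hx
      · simp [if_neg hnlt]
      · obtain ⟨q, hq, rfl⟩ := List.mem_map.mp hx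
        exact if_neg (by have := hge q hq; omega)
    have hsg : sGt ((b, bc) :: LB') a
        = ((((b, bc) :: LB').map (fun kv => kv.2)).sum) - (if b = a then bc else 0) := by
      simp only [sGt, List.map_cons, List.sum_cons]
      have : ∀ q ∈ LB', (if a < q.1 then q.2 else 0) = q.2 := by
        intro q hq; exact if_pos (by have := hge q hq; omega)
      rw [List.map_congr_left this]
      rcases eq_or_lt_of_le (not_lt.mp hnlt) with h | h
      · subst h; simp
      · simp only [if_pos h, if_neg (by omega : ¬ b = a)]; ring
    simp only [List.map_cons, List.sum_cons, Prod.mk.injEq, hsl, hsg]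
    constructor
    · ring
    · rw [hT]; simp only [List.map_cons, List.sum_cons]; ring
  | case4 less aw bw a ac rest ih =>
    intro hA hB hT
    rw [mergeGo]
    rw [ih (List.pairwise_cons.mp hA).2 hB hT]
    simp only [sLess, sGt, List.map_cons, List.sum_cons, List.map_nil, List.sum_nil,
      Prod.mk.injEq]
    simp at hT
    constructor <;> [skip; rw [hT]] <;> ring

def DRel (d1 d2 : PySem.Dict Int Int) : Prop :=
  d1.keys.Nodup ∧ d2.keys.Nodup ∧ (∀ v, d1.getD v 0 = d2.getD v 0) ∧
    (∀ v, v ∈ d1.keys ↔ v ∈ d2.keys)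

-- generic accumulate-fold over a list with a computed key
theorem bump_getD {α : Type} (key amt : α → Int) :
    ∀ (l : List α) (d : PySem.Dict Int Int) (v : Int),
      (l.foldl (fun d x => d.insert (key x) (d.getD (key x) 0 + amt x)) d).getD v 0
        = d.getD v 0 + (l.map (fun x => if key x = v then amt x else 0)).sum := by
  intro l
  induction l with
  | nil => intro d v; simp
  | cons x t ih =>
    intro d v
    simp only [List.foldl_cons, List.map_cons, List.sum_cons, ih]
    rw [PySem.Dict.getD_insert]
    by_cases h : v = key x
    · subst h; simp; ring
    · rw [if_neg h, if_neg (fun hh => h hh.symm)]; ring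

theorem bump_mem_keys {α : Type} (key amt : α → Int) (l : List α) (d : PySem.Dict Int Int)
    (v : Int) :
    v ∈ (l.foldl (fun d x => d.insert (key x) (d.getD (key x) 0 + amt x)) d).keys
      ↔ v ∈ d.keys ∨ ∃ x ∈ l, key x = v := by
  rw [PySem.Dict.keys_foldl_insert_key l key (fun d x => d.getD (key x) 0 + amt x) d]
  rw [PySem.Set.mem_update]
  simp [eq_comm]

theorem bump_nodup {α : Type} (key amt : α → Int) (l : List α) (d : PySem.Dict Int Int)
    (h : d.keys.Nodup) :
    (l.foldl (fun d x => d.insert (key x) (d.getD (key x) 0 + amt x)) d).keys.Nodup :=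
  PySem.Dict.nodup_keys_foldl_insert_key l key _ d h

-- double-sum swap
theorem sum_map_comm {α β : Type} (l1 : List α) (l2 : List β) (g : α → β → Int) :
    (l1.map (fun a => (l2.map (g a)).sum)).sum
      = (l2.map (fun b => (l1.map (fun a => g a b)).sum)).sum := by
  induction l1 with
  | nil => simp
  | cons a t ih =>
    simp only [List.map_cons, List.sum_cons, ih, PySem.List.sum_map_add_int]

theorem nestA_getD (dice : List Int) :
    ∀ (items : List (Int × Int)) (d : PySem.Dict Int Int) (v : Int),
      (items.foldl
          (fun d pc =>
            dice.foldl (fun d face => d.insert (pc.1 + face) (d.getD (pc.1 + face) 0 + pc.2)) d)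
          d).getD v 0
        = d.getD v 0
          + (items.map (fun pc => (dice.map (fun f => if pc.1 + f = v then pc.2 else 0)).sum)).sum := by
  intro items
  induction items with
  | nil => intro d v; simp
  | cons pc t ih =>
    intro d v
    simp only [List.foldl_cons, List.map_cons, List.sum_cons, ih]
    rw [bump_getD (fun f => pc.1 + f) (fun _ => pc.2) dice d v]
    ring

theorem nestB_getD (items : List (Int × Int)) :
    ∀ (dice : List Int) (d : PySem.Dict Int Int) (v : Int),
      (dice.foldl
          (fun d face =>
            items.foldl (fun d pc => d.insert (pc.1 + face) (d.getD (pc.1 + face) 0 + pc.2)) d)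
          d).getD v 0
        = d.getD v 0
          + (dice.map (fun f => (items.map (fun pc => if pc.1 + f = v then pc.2 else 0)).sum)).sum := by
  intro dice
  induction dice with
  | nil => intro d v; simp
  | cons f t ih =>
    intro d v
    simp only [List.foldl_cons, List.map_cons, List.sum_cons, ih]
    rw [bump_getD (fun pc : Int × Int => pc.1 + f) (fun pc => pc.2) items d v]
    ring

theorem nestA_mem (dice : List Int) :
    ∀ (items : List (Int × Int)) (d : PySem.Dict Int Int) (v : Int),
      (v ∈ (items.foldl
          (fun d pc =>
            dice.foldl (fun d face => d.insert (pc.1 + face) (d.getD (pc.1 + face) 0 + pc.2)) d)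
          d).keys)
        ↔ v ∈ d.keys ∨ ∃ pc ∈ items, ∃ f ∈ dice, pc.1 + f = v := by
  intro items
  induction items with
  | nil => intro d v; simp
  | cons pc t ih =>
    intro d v
    simp only [List.foldl_cons, ih]
    rw [bump_mem_keys (fun f => pc.1 + f) (fun _ => pc.2) dice d v]
    simp only [List.mem_cons]
    constructor
    · rintro (⟨h | ⟨f, hf, hfe⟩⟩ | h)
      · exact Or.inl h
      · exact Or.inr ⟨pc, Or.inl rfl, f, hf, hfe⟩
      · obtain ⟨q, hq, hrest⟩ := h; exact Or.inr ⟨q, Or.inr hq, hrest⟩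
    · rintro (h | ⟨q, hq | hq, hrest⟩)
      · exact Or.inl (Or.inl h)
      · subst hq; exact Or.inl (Or.inr hrest)
      · exact Or.inr ⟨q, hq, hrest⟩

theorem nestB_mem (items : List (Int × Int)) :
    ∀ (dice : List Int) (d : PySem.Dict Int Int) (v : Int),
      (v ∈ (dice.foldl
          (fun d face =>
            items.foldl (fun d pc => d.insert (pc.1 + face) (d.getD (pc.1 + face) 0 + pc.2)) d)
          d).keys)
        ↔ v ∈ d.keys ∨ ∃ f ∈ dice, ∃ pc ∈ items, pc.1 + f = v := by
  intro dice
  induction dice with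
  | nil => intro d v; simp
  | cons f t ih =>
    intro d v
    simp only [List.foldl_cons, ih]
    rw [bump_mem_keys (fun pc : Int × Int => pc.1 + f) (fun pc => pc.2) items d v]
    simp only [List.mem_cons]
    constructor
    · rintro (⟨h | ⟨pc, hpc, hfe⟩⟩ | h)
      · exact Or.inl h
      · exact Or.inr ⟨f, Or.inl rfl, pc, hpc, hfe⟩
      · obtain ⟨g, hg, hrest⟩ := h; exact Or.inr ⟨g, Or.inr hg, hrest⟩
    · rintro (h | ⟨g, hg | hg, hrest⟩)
      · exact Or.inl (Or.inl h)
      · subst hg; exact Or.inl (Or.inr hrest)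
      · exact Or.inr ⟨g, hg, hrest⟩

theorem nestA_nodup (dice : List Int) :
    ∀ (items : List (Int × Int)) (d : PySem.Dict Int Int), d.keys.Nodup →
      (items.foldl
          (fun d pc =>
            dice.foldl (fun d face => d.insert (pc.1 + face) (d.getD (pc.1 + face) 0 + pc.2)) d)
          d).keys.Nodup := by
  intro items
  induction items with
  | nil => intro d h; simpa using h
  | cons pc t ih =>
    intro d h
    simp only [List.foldl_cons]
    exact ih _ (bump_nodup (fun f => pc.1 + f) (fun _ => pc.2) dice d h)

theorem nestB_nodup (items : List (Int × Int)) :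
    ∀ (dice : List Int) (d : PySem.Dict Int Int), d.keys.Nodup →
      (dice.foldl
          (fun d face =>
            items.foldl (fun d pc => d.insert (pc.1 + face) (d.getD (pc.1 + face) 0 + pc.2)) d)
          d).keys.Nodup := by
  intro dice
  induction dice with
  | nil => intro d h; simpa using h
  | cons f t ih =>
    intro d h
    simp only [List.foldl_cons]
    exact ih _ (bump_nodup (fun pc : Int × Int => pc.1 + f) (fun pc => pc.2) items d h)

theorem items_perm_of_rel (d1 d2 : PySem.Dict Int Int) (h : DRel d1 d2) :
    d1.items.Perm d2.items := by
  obtain ⟨hn1, hn2, hg, hm⟩ := h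
  have hkp : d1.keys.Perm d2.keys := (List.perm_ext_iff_of_nodup hn1 hn2).mpr hm
  rw [PySem.Dict.items_eq_map_keys d1 hn1 0, PySem.Dict.items_eq_map_keys d2 hn2 0]
  have : d2.keys.map (fun k => (k, d2.getD k 0)) = d2.keys.map (fun k => (k, d1.getD k 0)) := by
    apply List.map_congr_left
    intro k _
    rw [hg k]
  rw [this]
  exact hkp.map _

theorem drel_step (dice : List Int) (s1 s2 : PySem.Dict Int Int) (h : DRel s1 s2) :
    DRel
      (s1.items.foldl
        (fun new_sums pc =>
          dice.foldl
            (fun new_sums face =>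
              new_sums.insert (pc.1 + face) (new_sums.getD (pc.1 + face) 0 + pc.2))
            new_sums)
        PySem.Dict.empty)
      (dice.foldl
        (fun new face =>
          s2.items.foldl
            (fun new pc => new.insert (pc.1 + face) (new.getD (pc.1 + face) 0 + pc.2))
            new)
        PySem.Dict.empty) := by
  have hperm : s1.items.Perm s2.items := items_perm_of_rel s1 s2 h
  refine ⟨nestA_nodup dice s1.items _ (by simp), nestB_nodup s2.items dice _ (by simp), ?_, ?_⟩
  · intro v
    rw [nestA_getD dice s1.items _ v, nestB_getD s2.items dice _ v]
    rw [sum_map_comm dice s2.items (fun f pc => if pc.1 + f = v then pc.2 else 0)]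
    simp only [PySem.Dict.getD_empty]
    congr 1
    exact List.Perm.sum_eq (hperm.map _)
  · intro v
    rw [nestA_mem dice s1.items _ v, nestB_mem s2.items dice _ v]
    simp only [PySem.Dict.keys_empty, List.not_mem_nil, false_or]
    constructor
    · rintro ⟨pc, hpc, f, hf, he⟩; exact ⟨f, hf, pc, hperm.mem_iff.mp hpc, he⟩
    · rintro ⟨f, hf, pc, hpc, he⟩; exact ⟨pc, hperm.mem_iff.mpr hpc, f, hf, he⟩

theorem drel_foldl :
    ∀ (dg : List (List Int)) (s1 s2 : PySem.Dict Int Int), DRel s1 s2 →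
      DRel
        (dg.foldl
          (fun sums current_dice =>
            sums.items.foldl
              (fun new_sums pc =>
                current_dice.foldl
                  (fun new_sums face =>
                    new_sums.insert (pc.1 + face) (new_sums.getD (pc.1 + face) 0 + pc.2))
                  new_sums)
              PySem.Dict.empty)
          s1)
        (dg.foldl
          (fun sums dice =>
            dice.foldl
              (fun new face =>
                sums.items.foldl
                  (fun new pc => new.insert (pc.1 + face) (new.getD (pc.1 + face) 0 + pc.2))
                  new)
              PySem.Dict.empty)
          s2) := by
  intro dg
  induction dg with
  | nil => intro s1 s2 h; exact h
  | cons dice t ih =>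
    intro s1 s2 h
    simp only [List.foldl_cons]
    exact ih _ _ (drel_step dice s1 s2 h)

theorem rel_sums (dg : List (List Int)) : DRel (getSums dg) (altSums dg) := by
  unfold getSums altSums
  by_cases hdg : dg = []
  · rw [if_pos hdg, if_pos hdg]
    refine ⟨by simp, by simp, fun v => rfl, fun v => Iff.rfl⟩
  · rw [if_neg hdg, if_neg hdg]
    exact drel_foldl dg _ _ ⟨by decide, by decide, fun v => rfl, fun v => Iff.rfl⟩

theorem pairwise_lt_of_sorted_nodup (L : List (Int × Int))
    (hnd : (L.map (fun kv : Int × Int => kv.1)).Nodup) :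
    List.Pairwise (fun p q : Int × Int => p.1 < q.1)
      (PySem.List.sorted L (fun kv => kv.1) false) := by
  have hle := PySem.List.sorted_pairwise L (fun kv : Int × Int => kv.1)
  have hperm : (PySem.List.sorted L (fun kv : Int × Int => kv.1) false).Perm L :=
    PySem.List.sorted_perm L _ false
  have hnd' : ((PySem.List.sorted L (fun kv : Int × Int => kv.1) false).map
      (fun kv : Int × Int => kv.1)).Nodup := (hperm.map _).nodup_iff.mpr hnd
  have hne : List.Pairwise (fun p q : Int × Int => p.1 ≠ q.1)
      (PySem.List.sorted L (fun kv => kv.1) false) := List.pairwise_map.mp hnd'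
  exact (hle.and hne).imp (fun h => lt_of_le_of_ne h.1 h.2)

theorem sLess_perm (LB LB' : List (Int × Int)) (h : LB.Perm LB') (a : Int) :
    sLess LB a = sLess LB' a := List.Perm.sum_eq (h.map _)

theorem sGt_perm (LB LB' : List (Int × Int)) (h : LB.Perm LB') (a : Int) :
    sGt LB a = sGt LB' a := List.Perm.sum_eq (h.map _)

theorem wWin_congr (LA LA' LB LB' : List (Int × Int)) (h1 : LA.Perm LA') (h2 : LB.Perm LB') :
    wWin LA LB = wWin LA' LB' := by
  unfold wWin
  rw [List.Perm.sum_eq (h1.map _)]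
  congr 1
  apply List.map_congr_left
  intro p _
  rw [sLess_perm LB LB' h2]

theorem wLose_congr (LA LA' LB LB' : List (Int × Int)) (h1 : LA.Perm LA') (h2 : LB.Perm LB') :
    wLose LA LB = wLose LA' LB' := by
  unfold wLose
  rw [List.Perm.sum_eq (h1.map _)]
  congr 1
  apply List.map_congr_left
  intro p _
  rw [sGt_perm LB LB' h2]

-- ===== VERDICT (by name: the statement is the Claim_ definition above) =====
theorem win_game_fast_spec : Claim_equal_win_game_fast := by
  intro A B _
  unfold Spec_win_game_fast
  simp only [win_game_fast, win_game_fast_alt]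
  have hRA := rel_sums A
  have hRB := rel_sums B
  -- A side: the double loop is the pair of double sums
  rw [outerA (getSums A).items (getSums B).items 0 0]
  -- B side: the merge pass
  set SA := PySem.List.sorted (altSums A).items (fun kv => kv.1) false with hSA
  set SB := PySem.List.sorted (altSums B).items (fun kv => kv.1) false with hSB
  have hpa : (getSums A).items.Perm SA :=
    (items_perm_of_rel _ _ hRA).trans (PySem.List.sorted_perm _ _ false).symm
  have hpb : (getSums B).items.Perm SB :=
    (items_perm_of_rel _ _ hRB).trans (PySem.List.sorted_perm _ _ false).symm
  have hAle : List.Pairwise (fun p q : Int × Int => p.1 ≤ q.1) SA :=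
    PySem.List.sorted_pairwise _ _
  have hBlt : List.Pairwise (fun p q : Int × Int => p.1 < q.1) SB :=
    pairwise_lt_of_sorted_nodup (altSums B).items hRB.2.1
  rw [merge_spec ((SB.map (fun kv => kv.2)).sum) SA SB 0 0 0 hAle hBlt (by ring)]
  have e1 : wWin (getSums A).items (getSums B).items
      = (SA.map (fun p => p.2 * (0 + sLess SB p.1))).sum := by
    rw [wWin_congr _ SA _ SB hpa hpb]
    unfold wWin
    congr 1
    apply List.map_congr_left
    intro p _
    ring
  have e2 : wLose (getSums A).items (getSums B).items
      = (SA.map (fun p => p.2 * sGt SB p.1)).sum := wLose_congr _ SA _ SB hpa hpb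
  rw [e1, e2]
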